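-- pv_equiv track=rewrite | github.com/nnoorfatima0012/NLPIAS_FYP | nlp-service/services/docling_ocr.py | merge_and_clean
-- ===== SOURCE A (Python) =====
-- def merge_and_clean(docling_text: str, ocr_text: str) -> str:
--     """
--     Merge docling + ocr and deduplicate lines (Cell 6).
--     """
--     merged = (docling_text + "\n" + ocr_text).strip()
--     lines = [ln.strip() for ln in merged.splitlines() if ln.strip()]
--
--     deduped = []
--     seen = set()
--     for l in lines:
--         if l not in seen:
--             deduped.append(l)
--             seen.add(l)
--
--     return "\n".join(deduped)
-- ===== SOURCE B (Python) =====
-- def merge_and_clean(docling_text: str, ocr_text: str) -> str: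
--     """
--     Merge docling + ocr and deduplicate lines by a worklist-filter algorithm:
--     repeatedly emit the first remaining line and delete all of its later
--     occurrences from the worklist (no seen-set is maintained).
--     """
--     merged = (docling_text + "\n" + ocr_text).strip()
--     lines = [ln.strip() for ln in merged.splitlines() if ln.strip()]
--     out = []
--     while lines:
--         head = lines[0]
--         out.append(head)
--         lines = [y for y in lines[1:] if y != head]
--     return "\n".join(out)
-- ===== Notes on version B (the rewrite author's own statement) =====
-- stated objective: alternative
-- what changed: replaces A's single pass with a seen-set accumulator by a worklist-filter algorithm that repeatedly emits the first remaining line and deletes all its later occurrences from the worklist; preprocessing is byte-identical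
import Mathlib
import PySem

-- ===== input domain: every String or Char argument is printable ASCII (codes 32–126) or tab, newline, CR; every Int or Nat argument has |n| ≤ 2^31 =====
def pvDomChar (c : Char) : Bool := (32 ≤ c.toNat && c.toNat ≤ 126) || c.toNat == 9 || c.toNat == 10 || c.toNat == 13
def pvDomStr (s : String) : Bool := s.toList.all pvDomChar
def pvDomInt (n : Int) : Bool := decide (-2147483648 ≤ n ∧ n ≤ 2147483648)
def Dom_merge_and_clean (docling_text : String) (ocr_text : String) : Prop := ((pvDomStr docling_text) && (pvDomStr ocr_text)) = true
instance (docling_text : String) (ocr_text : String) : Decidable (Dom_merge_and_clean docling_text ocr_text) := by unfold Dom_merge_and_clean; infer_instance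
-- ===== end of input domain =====

-- B replaces A's seen-set accumulator pass by a worklist-filter algorithm (emit the head line, delete all its later occurrences, repeat); alternative, not faster; preprocessing identical.

-- ===== PORT A =====
-- merged = (docling_text + "\n" + ocr_text).strip(); lines = [ln.strip() for ln in merged.splitlines() if ln.strip()]
def pvLinesA (docling_text : String) (ocr_text : String) : List String :=
  ((PySem.Str.splitlines (PySem.Str.strip (PySem.Str.join "" [docling_text, "\n", ocr_text]))).filter
    (fun ln => !(PySem.Str.strip ln == ""))).map PySem.Str.strip

def merge_and_clean (docling_text : String) (ocr_text : String) : String :=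
  PySem.Str.join "\n"
    (((pvLinesA docling_text ocr_text).foldl
      (fun (st : List String × PySem.Set String) l =>
        if PySem.Set.contains st.2 l then st else (st.1 ++ [l], PySem.Set.add st.2 l))
      (([] : List String), (PySem.Set.empty : PySem.Set String))).1)

-- ===== PORT B =====
-- same preprocessing as A (byte-identical in Source B)
def pvLinesB (docling_text : String) (ocr_text : String) : List String :=
  ((PySem.Str.splitlines (PySem.Str.strip (PySem.Str.join "" [docling_text, "\n", ocr_text]))).filter
    (fun ln => !(PySem.Str.strip ln == ""))).map PySem.Str.strip

-- Source B's worklist loop: emit lines[0], then lines = [y for y in lines[1:] if y != head]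
def pvDedupB : List String → List String
  | [] => []
  | x :: xs => x :: pvDedupB (xs.filter (fun y => !(y == x)))
termination_by xs => xs.length
decreasing_by simpa using Nat.lt_succ_of_le (le_trans (List.length_filter_le _ _) (le_of_eq List.length_attach))

def merge_and_clean_alt (docling_text : String) (ocr_text : String) : String :=
  PySem.Str.join "\n" (pvDedupB (pvLinesB docling_text ocr_text))

-- ===== PRECONDITION & SPEC =====
def Spec_merge_and_clean (docling_text : String) (ocr_text : String) (out : String) : Prop := out = merge_and_clean_alt docling_text ocr_text
instance (docling_text : String) (ocr_text : String) (out : String) : Decidable (Spec_merge_and_clean docling_text ocr_text out) := by unfold Spec_merge_and_clean; infer_instance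

-- ===== CLAIM (what is proved, stated in full; the proofs are below) =====
def Claim_equal_merge_and_clean : Prop := ∀ (docling_text : String) (ocr_text : String), Dom_merge_and_clean docling_text ocr_text → Spec_merge_and_clean docling_text ocr_text (merge_and_clean docling_text ocr_text)

-- ===== LEMMAS AND PROOFS =====

-- A's loop keeps deduped = seen (as a list): the fold starting on the diagonal computes Set.update.
theorem loopA_eq_update (xs : List String) (s : PySem.Set String) :
    (xs.foldl
      (fun (st : List String × PySem.Set String) l =>
        if PySem.Set.contains st.2 l then st else (st.1 ++ [l], PySem.Set.add st.2 l))
      (s, s)).1 = PySem.Set.update s xs := by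
  induction xs generalizing s with
  | nil => simp [PySem.Set.update]
  | cons x xs ih =>
    by_cases h : x ∈ s
    · have hc : PySem.Set.contains s x = true := (PySem.Set.contains_iff s x).mpr h
      rw [List.foldl_cons, if_pos hc, PySem.Set.update_cons, PySem.Set.add_of_mem h]
      exact ih s
    · rw [List.foldl_cons, if_neg (by simpa using h), PySem.Set.update_cons,
        PySem.Set.add_of_not_mem h]
      exact ih (s ++ [x])

-- first-occurrence dedup commutes with filtering
theorem ofList_filter (p : String → Bool) (xs : List String) :
    PySem.Set.ofList (xs.filter p) = (PySem.Set.ofList xs).filter p := by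
  induction xs with
  | nil => simp [PySem.Set.ofList_nil]
  | cons y ys ih =>
    by_cases hy : p y = true
    · rw [List.filter_cons_of_pos hy, PySem.Set.ofList_cons, PySem.Set.ofList_cons,
        PySem.Set.discard, PySem.Set.discard, ih, List.filter_cons_of_pos hy,
        List.filter_comm]
    · have hy' : p y = false := by simpa using hy
      rw [List.filter_cons_of_neg (by simp [hy']), PySem.Set.ofList_cons,
        List.filter_cons_of_neg (by simp [hy']), PySem.Set.discard, ih,
        List.filter_filter]
      congr 1
      funext a
      by_cases ha : a = y
      · subst ha; simp [hy']
      · simp [ha]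

-- B's worklist-filter recursion computes first-occurrence dedup.
theorem pvDedupB_eq_ofList (xs : List String) : pvDedupB xs = PySem.Set.ofList xs := by
  induction xs using pvDedupB.induct with
  | case1 => simp [pvDedupB, PySem.Set.ofList_nil]
  | case2 x xs ih =>
    simp only [List.unattach_filter, List.unattach_attach] at ih
    rw [pvDedupB, ih, ofList_filter, PySem.Set.ofList_cons, PySem.Set.discard]

-- ===== VERDICT (by name: the statement is the Claim_ definition above) =====
theorem merge_and_clean_spec : Claim_equal_merge_and_clean := by
  intro d o _
  unfold Spec_merge_and_clean merge_and_clean merge_and_clean_alt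
  have hL : pvLinesB d o = pvLinesA d o := rfl
  rw [hL, pvDedupB_eq_ofList,
    show (([] : List String), (PySem.Set.empty : PySem.Set String))
      = ((PySem.Set.empty : PySem.Set String), (PySem.Set.empty : PySem.Set String)) from rfl,
    loopA_eq_update, PySem.Set.update_empty]
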